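-- pv_equiv track=rewrite | github.com/melikesraoz/kg-multihop-qa-turkish-music | scripts/spreading_activation_demo.py | select_relevant_triples
-- ===== SOURCE A (Python) =====
-- def normalize(text: str) -> str:
--     return " ".join(text.lower().strip().split())
--
-- def relation_priority(query: str):
--     q = normalize(query)
--
--     if "born" in q or "birth" in q:
--         return {
--             "place of birth",
--             "country",
--             "located in the administrative territorial entity",
--         }
--
--     if "instrument" in q:
--         return {
--             "instrument",
--             "subclass of",
--             "instance of",
--         }
--
--     if "genre" in q:
--         return {
--             "genre",
--             "subclass of",
--             "instance of",
--         }
--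
--     if "award" in q:
--         return {
--             "award received",
--             "instance of",
--             "subclass of",
--         }
--
--     if "record label" in q:
--         return {
--             "record label",
--             "country",
--             "located in the administrative territorial entity",
--         }
--
--     return set()
--
-- def select_relevant_triples(triples, query: str, visited_entities: set, max_k: int):
--     preferred = relation_priority(query)
--
--     scored = []
--     for t in triples:
--         rel_name = normalize(t.get("relation_name", ""))
--
--         score = 0
--         if rel_name in preferred:
--             score += 10
--
--         if "country" in rel_name:
--             score += 3
--         if "birth" in rel_name:
--             score += 3
--         if "located in the administrative territorial entity" in rel_name:
--             score += 2
--         if "instrument" in rel_name: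
--             score += 2
--         if "genre" in rel_name:
--             score += 2
--         if "award" in rel_name:
--             score += 2
--
--         scored.append((score, t))
--
--     scored.sort(key=lambda x: x[0], reverse=True)
--     selected = [t for score, t in scored[:max_k]]
--
--     if not selected:
--         selected = triples[:max_k]
--
--     return selected
-- ===== SOURCE B (Python) =====
-- def normalize(text: str) -> str:
--     return " ".join(text.lower().strip().split())
--
-- def relation_priority(query: str):
--     q = normalize(query)
--     if "born" in q or "birth" in q:
--         return {"place of birth", "country",
--                 "located in the administrative territorial entity"}
--     if "instrument" in q:
--         return {"instrument", "subclass of", "instance of"}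
--     if "genre" in q:
--         return {"genre", "subclass of", "instance of"}
--     if "award" in q:
--         return {"award received", "instance of", "subclass of"}
--     if "record label" in q:
--         return {"record label", "country",
--                 "located in the administrative territorial entity"}
--     return set()
--
-- def _score(rel_name: str, preferred) -> int:
--     return ((10 if rel_name in preferred else 0)
--             + (3 if "country" in rel_name else 0)
--             + (3 if "birth" in rel_name else 0)
--             + (2 if "located in the administrative territorial entity" in rel_name else 0)
--             + (2 if "instrument" in rel_name else 0)
--             + (2 if "genre" in rel_name else 0)
--             + (2 if "award" in rel_name else 0))
--
-- def select_relevant_triples(triples, query: str, visited_entities: set, max_k: int):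
--     # Bucket selection instead of sorting: scores lie in 0..24, so collect the
--     # triples bucket by bucket in descending score order, which reproduces the
--     # stable descending sort without calling a sort.
--     preferred = relation_priority(query)
--     scored = [(_score(normalize(t.get("relation_name", "")), preferred), t) for t in triples]
--     ordered = [t for s in range(24, -1, -1) for (sc, t) in scored if sc == s]
--     selected = ordered[:max_k]
--     if not selected:
--         selected = triples[:max_k]
--     return selected
-- ===== Notes on version B (the rewrite author's own statement) =====
-- stated objective: alternative
-- what changed: B replaces A's stable descending sort of the scored list by a single bucket pass: scores always lie in 0..24, so triples are grouped by score and read out in descending score order, which reproduces the stable sort without sorting.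
import Mathlib
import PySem

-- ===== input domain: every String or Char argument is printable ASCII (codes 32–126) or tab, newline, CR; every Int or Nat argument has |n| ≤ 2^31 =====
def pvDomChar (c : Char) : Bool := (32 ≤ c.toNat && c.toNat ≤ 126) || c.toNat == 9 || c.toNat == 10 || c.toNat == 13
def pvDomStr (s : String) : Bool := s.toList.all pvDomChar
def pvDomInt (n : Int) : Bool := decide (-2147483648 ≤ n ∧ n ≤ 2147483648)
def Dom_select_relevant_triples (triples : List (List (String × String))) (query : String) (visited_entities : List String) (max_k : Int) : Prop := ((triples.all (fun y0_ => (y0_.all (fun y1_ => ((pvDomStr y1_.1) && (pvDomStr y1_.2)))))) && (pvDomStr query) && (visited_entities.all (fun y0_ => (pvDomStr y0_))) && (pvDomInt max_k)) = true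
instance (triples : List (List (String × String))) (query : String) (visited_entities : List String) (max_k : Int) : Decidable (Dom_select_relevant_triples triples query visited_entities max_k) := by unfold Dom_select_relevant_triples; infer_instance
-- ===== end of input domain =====

-- B replaces A's stable descending sort by a bucket pass over the score range 0..24 (no sort call); return values are proved equal.

-- ===== PORT A =====
-- helpers shared by both Pythons (same module): normalize, relation_priority
def pvNormalize (text : String) : String :=
  PySem.Str.join " " (PySem.Str.split₀ (PySem.Str.strip (PySem.Str.lower text)))

def pvRelationPriority (query : String) : PySem.Set String :=
  let q := pvNormalize query
  if PySem.Str.isIn "born" q || PySem.Str.isIn "birth" q then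
    PySem.Set.ofList ["place of birth", "country",
      "located in the administrative territorial entity"]
  else if PySem.Str.isIn "instrument" q then
    PySem.Set.ofList ["instrument", "subclass of", "instance of"]
  else if PySem.Str.isIn "genre" q then
    PySem.Set.ofList ["genre", "subclass of", "instance of"]
  else if PySem.Str.isIn "award" q then
    PySem.Set.ofList ["award received", "instance of", "subclass of"]
  else if PySem.Str.isIn "record label" q then
    PySem.Set.ofList ["record label", "country",
      "located in the administrative territorial entity"]
  else
    PySem.Set.empty

-- A's in-loop score accumulation, as the literal chain of updates
def pvScoreA (preferred : PySem.Set String) (rel_name : String) : Int :=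
  let score : Int := 0
  let score := if PySem.Set.contains preferred rel_name then score + 10 else score
  let score := if PySem.Str.isIn "country" rel_name then score + 3 else score
  let score := if PySem.Str.isIn "birth" rel_name then score + 3 else score
  let score := if PySem.Str.isIn "located in the administrative territorial entity" rel_name then score + 2 else score
  let score := if PySem.Str.isIn "instrument" rel_name then score + 2 else score
  let score := if PySem.Str.isIn "genre" rel_name then score + 2 else score
  let score := if PySem.Str.isIn "award" rel_name then score + 2 else score
  score

def select_relevant_triples (triples : List (List (String × String))) (query : String) (visited_entities : List String) (max_k : Int) : List (List (String × String)) :=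
  let preferred := pvRelationPriority query
  let scored := triples.foldl (fun scored t =>
    let rel_name := pvNormalize ((PySem.Dict.ofList t).getD "relation_name" "")
    scored ++ [(pvScoreA preferred rel_name, t)]) []
  let scored := PySem.List.sorted scored (fun x => x.1) true
  let selected := (PySem.List.slice scored none (some max_k)).map (fun x => x.2)
  if selected = [] then PySem.List.slice triples none (some max_k) else selected

-- ===== PORT B =====
-- B's _score: a sum of bonuses
def pvScoreB (rel_name : String) (preferred : PySem.Set String) : Int :=
  (if PySem.Set.contains preferred rel_name then 10 else 0)
  + (if PySem.Str.isIn "country" rel_name then 3 else 0)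
  + (if PySem.Str.isIn "birth" rel_name then 3 else 0)
  + (if PySem.Str.isIn "located in the administrative territorial entity" rel_name then 2 else 0)
  + (if PySem.Str.isIn "instrument" rel_name then 2 else 0)
  + (if PySem.Str.isIn "genre" rel_name then 2 else 0)
  + (if PySem.Str.isIn "award" rel_name then 2 else 0)

def select_relevant_triples_alt (triples : List (List (String × String))) (query : String) (visited_entities : List String) (max_k : Int) : List (List (String × String)) :=
  let preferred := pvRelationPriority query
  let scored := triples.map (fun t =>
    (pvScoreB (pvNormalize ((PySem.Dict.ofList t).getD "relation_name" "")) preferred, t))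
  let ordered := (PySem.List.pyRange 24 (-1) (-1)).flatMap (fun s =>
    (scored.filter (fun p => decide (p.1 = s))).map (fun p => p.2))
  let selected := PySem.List.slice ordered none (some max_k)
  if selected = [] then PySem.List.slice triples none (some max_k) else selected

-- ===== PRECONDITION & SPEC =====
def Spec_select_relevant_triples (triples : List (List (String × String))) (query : String) (visited_entities : List String) (max_k : Int) (out : List (List (String × String))) : Prop := out = select_relevant_triples_alt triples query visited_entities max_k
instance (triples : List (List (String × String))) (query : String) (visited_entities : List String) (max_k : Int) (out : List (List (String × String))) : Decidable (Spec_select_relevant_triples triples query visited_entities max_k out) := by unfold Spec_select_relevant_triples; infer_instance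

-- ===== CLAIM (what is proved, stated in full; the proofs are below) =====
def Claim_equal_select_relevant_triples : Prop := ∀ (triples : List (List (String × String))) (query : String) (visited_entities : List String) (max_k : Int), Dom_select_relevant_triples triples query visited_entities max_k → Spec_select_relevant_triples triples query visited_entities max_k (select_relevant_triples triples query visited_entities max_k)

-- ===== LEMMAS AND PROOFS =====

-- A's update chain computes B's sum of bonuses
lemma pvScoreA_eq (preferred : PySem.Set String) (rel : String) :
    pvScoreA preferred rel = pvScoreB rel preferred := by
  simp only [pvScoreA, pvScoreB]
  split_ifs <;> omega

lemma pvScoreB_bounds (rel : String) (preferred : PySem.Set String) :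
    0 ≤ pvScoreB rel preferred ∧ pvScoreB rel preferred ≤ 24 := by
  unfold pvScoreB
  split_ifs <;> omega

-- inserting after a prefix that never satisfies `before`
lemma insertBy_append_not_before {α : Type} (before : α → α → Bool) (x : α)
    (as bs : List α) (h : ∀ a ∈ as, before x a = false) :
    PySem.List.insertBy before x (as ++ bs) = as ++ PySem.List.insertBy before x bs := by
  induction as with
  | nil => simp
  | cons a as ih =>
    have ha : before x a = false := h a (by simp)
    simp only [List.cons_append, PySem.List.insertBy, ha]
    simp only [Bool.false_eq_true, if_false]
    rw [ih (fun a ha => h a (by simp [ha]))]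

lemma insertBy_cons_before {α : Type} (before : α → α → Bool) (x y : α) (ys : List α)
    (h : before x y = true) :
    PySem.List.insertBy before x (y :: ys) = x :: y :: ys := by
  simp [PySem.List.insertBy, h]

-- key insertion step: stable-descending insertion into a bucket concatenation
lemma insertBy_flatMap {α : Type} (S : List Int) (hS : S.Pairwise (fun a b => b < a))
    (x : Int × α) (hx : x.1 ∈ S) (g : Int → List (Int × α))
    (hg : ∀ v, ∀ p ∈ g v, p.1 = v) :
    PySem.List.insertBy (fun a b => decide (b.1 < a.1)) x (S.flatMap g) =
      S.flatMap (fun v => g v ++ if x.1 = v then [x] else []) := by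
  induction S with
  | nil => simp at hx
  | cons v S ih =>
    have hpw : S.Pairwise (fun a b => b < a) := hS.tail
    have hlt : ∀ w ∈ S, w < v := fun w hw => (List.pairwise_cons.mp hS).1 w hw
    by_cases hxv : x.1 = v
    · -- x belongs to the first bucket: goes right after g v
      have hnotS : x.1 ∉ S := fun h => absurd (hlt _ h) (by simp [hxv])
      have hrest : S.flatMap (fun w => g w ++ if x.1 = w then [x] else []) = S.flatMap g := by
        apply List.flatMap_congr
        intro w hw
        have : x.1 ≠ w := fun h => hnotS (h ▸ hw)
        simp [this]
      have hfirst : ∀ a ∈ g v, (fun a b => decide ((b : Int × α).1 < a.1)) x a = false := by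
        intro a ha
        have : a.1 = v := hg v a ha
        simp [this, hxv]
      rw [List.flatMap_cons, insertBy_append_not_before _ _ _ _ hfirst]
      rw [List.flatMap_cons, hrest]
      simp only [hxv]
      cases hSg : S.flatMap g with
      | nil =>
        rw [PySem.List.insertBy_of_forall_not_before]
        · simp
        · intro y hy; simp at hy
      | cons q rest =>
        have hq : q ∈ S.flatMap g := by rw [hSg]; simp
        obtain ⟨w, hw, hqg⟩ := List.mem_flatMap.mp hq
        have hq1 : q.1 < x.1 := by rw [hg w q hqg, hxv]; exact hlt w hw
        rw [insertBy_cons_before _ _ _ _ (by simp [hq1])]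
        simp
    · -- x belongs to a later bucket
      have hxS : x.1 ∈ S := by cases hx with
        | head => exact absurd rfl hxv
        | tail _ h => exact h
      have hxlt : x.1 < v := hlt _ hxS
      have hfirst : ∀ a ∈ g v, (fun a b => decide ((b : Int × α).1 < a.1)) x a = false := by
        intro a ha
        have : a.1 = v := hg v a ha
        simp [this]; omega
      rw [List.flatMap_cons, insertBy_append_not_before _ _ _ _ hfirst,
        ih hpw hxS, List.flatMap_cons]
      simp [hxv]

-- the stable descending sort IS the bucket concatenation
lemma sorted_rev_eq_flatMap {α : Type} (xs : List (Int × α)) (S : List Int)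
    (hS : S.Pairwise (fun a b => b < a)) (hmem : ∀ p ∈ xs, p.1 ∈ S) :
    PySem.List.sorted xs (fun p => p.1) true =
      S.flatMap (fun v => xs.filter (fun p => decide (p.1 = v))) := by
  rw [PySem.List.sorted_rev_eq_foldl_insertBy]
  induction xs using List.reverseRecOn with
  | nil => simp
  | append_singleton ys x ih =>
    have hys : ∀ p ∈ ys, p.1 ∈ S := fun p hp => hmem p (by simp [hp])
    have hx : x.1 ∈ S := hmem x (by simp)
    rw [List.foldl_append, List.foldl_cons, List.foldl_nil, ih hys]
    rw [insertBy_flatMap S hS x hx _ (by intro v p hp; simpa using (List.mem_filter.mp hp).2)]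
    apply List.flatMap_congr
    intro v hv
    rw [List.filter_append]
    simp only [List.filter_cons, List.filter_nil]
    by_cases h : x.1 = v <;> simp [h]

-- map commutes with a [:k] slice
lemma map_slice_to {α β : Type} (f : α → β) (xs : List α) (b : Int) :
    (PySem.List.slice xs none (some b)).map f = PySem.List.slice (xs.map f) none (some b) := by
  simp [PySem.List.slice, PySem.List.clampIdx, List.map_take]

-- the descending score range, as a concrete list
lemma pyRange_desc : PySem.List.pyRange 24 (-1) (-1) =
    [24, 23, 22, 21, 20, 19, 18, 17, 16, 15, 14, 13, 12, 11, 10, 9, 8, 7, 6, 5, 4, 3, 2, 1, 0] := by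
  decide

lemma mem_pyRange_desc (k : Int) (h0 : 0 ≤ k) (h24 : k ≤ 24) :
    k ∈ PySem.List.pyRange 24 (-1) (-1) := by
  rw [pyRange_desc]
  simp only [List.mem_cons, List.not_mem_nil, or_false]
  omega

-- ===== VERDICT (by name: the statement is the Claim_ definition above) =====
theorem select_relevant_triples_spec : Claim_equal_select_relevant_triples := by
  intro triples query visited_entities max_k _
  unfold Spec_select_relevant_triples select_relevant_triples select_relevant_triples_alt
  simp only []
  set preferred := pvRelationPriority query with hpref
  set key : List (String × String) → Int :=
    fun t => pvScoreB (pvNormalize ((PySem.Dict.ofList t).getD "relation_name" "")) preferred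
    with hkey
  have hfold : triples.foldl (fun scored t =>
      let rel_name := pvNormalize ((PySem.Dict.ofList t).getD "relation_name" "")
      scored ++ [(pvScoreA preferred rel_name, t)]) [] =
      triples.map (fun t => (key t, t)) := by
    rw [PySem.List.foldl_append_singleton_eq_map]
    apply List.map_congr_left
    intro t _
    simp [pvScoreA_eq, hkey]
  rw [hfold]
  set scored := triples.map (fun t => (key t, t)) with hscored
  have hmem : ∀ p ∈ scored, p.1 ∈ PySem.List.pyRange 24 (-1) (-1) := by
    intro p hp
    obtain ⟨t, _, rfl⟩ := List.mem_map.mp hp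
    exact mem_pyRange_desc _ (pvScoreB_bounds _ _).1 (pvScoreB_bounds _ _).2
  have hpw : (PySem.List.pyRange 24 (-1) (-1)).Pairwise (fun a b => b < a) := by
    rw [pyRange_desc]; decide
  rw [sorted_rev_eq_flatMap scored _ hpw hmem, map_slice_to]
  rw [List.map_flatMap]
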